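-- pv_equiv track=rewrite | github.com/vladkeel/NatLang2 | Common.py | operation_t
-- ===== SOURCE A (Python) =====
-- from collections import defaultdict
--
-- def operation_t(a, b, op):
--     ret = defaultdict(int)
--     for k,v in a.items():
--         ret[k] += v
--     if op == '+':
--         for k,v in b.items():
--             ret[k] += v
--     else:
--         for k,v in b.items():
--             ret[k] -= v
--     return ret
-- ===== SOURCE B (Python) =====
-- from collections import defaultdict
--
-- def operation_t(a, b, op):
--     sign = 1 if op == '+' else -1
--     merged = [(k, v + sign * b.get(k, 0)) for k, v in a.items()] \
--            + [(k, sign * v) for k, v in b.items() if k not in a]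
--     return defaultdict(int, merged)
-- ===== Notes on version B (the rewrite author's own statement) =====
-- stated objective: simpler
-- what changed: Replaces A's two mutating accumulation passes over a defaultdict with a closed-form construction: one comprehension over a's items adding the signed b-value, plus one over b's items whose keys are new, concatenated.
import Mathlib
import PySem

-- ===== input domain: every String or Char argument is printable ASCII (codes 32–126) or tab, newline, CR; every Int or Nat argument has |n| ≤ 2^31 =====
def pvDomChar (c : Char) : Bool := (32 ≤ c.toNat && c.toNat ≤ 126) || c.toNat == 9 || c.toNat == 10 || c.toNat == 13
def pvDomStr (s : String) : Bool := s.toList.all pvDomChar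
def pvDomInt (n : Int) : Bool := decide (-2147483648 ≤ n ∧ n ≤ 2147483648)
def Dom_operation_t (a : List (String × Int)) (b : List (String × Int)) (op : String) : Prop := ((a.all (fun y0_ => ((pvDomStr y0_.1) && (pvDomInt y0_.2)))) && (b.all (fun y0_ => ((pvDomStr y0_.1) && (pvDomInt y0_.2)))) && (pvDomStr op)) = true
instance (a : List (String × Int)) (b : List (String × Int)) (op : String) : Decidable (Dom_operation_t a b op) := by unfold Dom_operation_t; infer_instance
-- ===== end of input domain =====

-- B replaces A's two mutating accumulation passes over a defaultdict by a closed-form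
-- concatenation of two comprehensions (same cost; objective: simpler).


-- ===== PORT A =====
-- a and b are Python dicts: PySem.Dict.ofList builds the dict the Python function receives.
def operation_t (a : List (String × Int)) (b : List (String × Int)) (op : String) : List (String × Int) :=
  let ret : PySem.Dict String Int := PySem.Dict.empty
  let ret := (PySem.Dict.ofList a).items.foldl (fun d kv => d.modify kv.1 0 (· + kv.2)) ret
  let ret :=
    if op == "+" then
      (PySem.Dict.ofList b).items.foldl (fun d kv => d.modify kv.1 0 (· + kv.2)) ret
    else
      (PySem.Dict.ofList b).items.foldl (fun d kv => d.modify kv.1 0 (· - kv.2)) ret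
  ret.items

-- ===== PORT B =====
def operation_t_alt (a : List (String × Int)) (b : List (String × Int)) (op : String) : List (String × Int) :=
  let da := PySem.Dict.ofList a
  let db := PySem.Dict.ofList b
  let sign : Int := if op == "+" then 1 else -1
  (da.items.map fun kv => (kv.1, kv.2 + sign * db.getD kv.1 0)) ++
    ((db.items.filter fun kv => !da.contains kv.1).map fun kv => (kv.1, sign * kv.2))

-- ===== PRECONDITION & SPEC =====
def Spec_operation_t (a : List (String × Int)) (b : List (String × Int)) (op : String) (out : List (String × Int)) : Prop := out = operation_t_alt a b op
instance (a : List (String × Int)) (b : List (String × Int)) (op : String) (out : List (String × Int)) : Decidable (Spec_operation_t a b op out) := by unfold Spec_operation_t; infer_instance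

-- ===== CLAIM (what is proved, stated in full; the proofs are below) =====
def Claim_equal_operation_t : Prop := ∀ (a : List (String × Int)) (b : List (String × Int)) (op : String), Dom_operation_t a b op → Spec_operation_t a b op (operation_t a b op)

-- ===== LEMMAS AND PROOFS =====

-- sum of the values of l at key k (a dict with Nodup keys has at most one)
def lkSum (l : List (String × Int)) (k : String) : Int :=
  ((l.filter (fun kv => kv.1 = k)).map Prod.snd).sum

theorem lkSum_nil (k : String) : lkSum [] k = 0 := rfl

theorem lkSum_cons (kv : String × Int) (t : List (String × Int)) (k : String) :
    lkSum (kv :: t) k = (if kv.1 = k then kv.2 else 0) + lkSum t k := by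
  by_cases h : kv.1 = k <;> simp [lkSum, h]

theorem lkSum_of_mem (l : List (String × Int)) (kv : String × Int) :
    (l.map Prod.fst).Nodup → kv ∈ l → lkSum l kv.1 = kv.2 := by
  induction l with
  | nil => intro _ hm; cases hm
  | cons hd t ih =>
      intro h hm
      simp only [List.map_cons, List.nodup_cons] at h
      rcases List.mem_cons.mp hm with hm | hm
      · subst hm
        have : lkSum t kv.1 = 0 := by
          have : kv.1 ∉ t.map Prod.fst := h.1
          unfold lkSum
          rw [List.filter_eq_nil_iff.mpr]
          · rfl
          · intro p hp hp'
            exact this (List.mem_map.mpr ⟨p, hp, (by simpa using hp')⟩)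
        rw [lkSum_cons, this]; simp
      · rw [lkSum_cons, ih h.2 hm]
        have : hd.1 ≠ kv.1 := by
          intro e; exact h.1 (e ▸ List.mem_map.mpr ⟨kv, hm, rfl⟩)
        simp [this]

theorem lkSum_of_not_mem (l : List (String × Int)) (k : String)
    (h : k ∉ l.map Prod.fst) : lkSum l k = 0 := by
  unfold lkSum
  rw [List.filter_eq_nil_iff.mpr]
  · rfl
  · intro p hp hp'
    exact h (List.mem_map.mpr ⟨p, hp, (by simpa using hp')⟩)

theorem getD_eq_lkSum (d : PySem.Dict String Int) (h : d.keys.Nodup) (k : String) :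
    d.getD k 0 = lkSum d.items k := by
  by_cases hc : d.contains k = true
  · rw [PySem.Dict.contains_eq_decide_mem_keys] at hc
    have hk : k ∈ d.items.map Prod.fst := of_decide_eq_true hc
    obtain ⟨kv, hm, hfst⟩ := List.mem_map.mp hk
    have := PySem.Dict.getD_of_mem_items (d := d) (k := kv.1) (v := kv.2) hm h 0
    rw [← hfst, this, lkSum_of_mem d.items kv h hm]
  · have hcf : d.contains k = false := by
      revert hc; cases h' : d.contains k <;> simp
    rw [PySem.Dict.getD_of_not_contains d 0 hcf]
    rw [lkSum_of_not_mem]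
    intro hk
    rw [PySem.Dict.contains_eq_decide_mem_keys] at hcf
    simp only [decide_eq_false_iff_not] at hcf
    exact hcf hk

theorem getD_fold_modify (s : Int) (l : List (String × Int)) (d : PySem.Dict String Int) (k : String) :
    (l.foldl (fun d kv => d.modify kv.1 0 (fun x => x + s * kv.2)) d).getD k 0
      = d.getD k 0 + s * lkSum l k := by
  induction l generalizing d with
  | nil => simp [lkSum_nil]
  | cons kv t ih =>
      rw [List.foldl_cons, ih, PySem.Dict.getD_modify, lkSum_cons]
      by_cases h : k = kv.1
      · subst h; simp; ring
      · have h' : kv.1 ≠ k := fun e => h e.symm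
        simp [h, h']

theorem core (s : Int) (A B : List (String × Int))
    (hA : (A.map Prod.fst).Nodup) (hB : (B.map Prod.fst).Nodup) :
    (B.foldl (fun d kv => d.modify kv.1 0 (fun x => x + s * kv.2))
       (A.foldl (fun d kv => d.modify kv.1 0 (fun x => x + 1 * kv.2)) PySem.Dict.empty)).items
    = (A.map fun kv => (kv.1, kv.2 + s * lkSum B kv.1)) ++
      ((B.filter fun kv => !(List.contains (A.map Prod.fst) kv.1)).map fun kv => (kv.1, s * kv.2)) := by
  set d1 := A.foldl (fun d kv => d.modify kv.1 0 (fun x => x + 1 * kv.2)) PySem.Dict.empty with hd1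
  set d2 := B.foldl (fun d kv => d.modify kv.1 0 (fun x => x + s * kv.2)) d1 with hd2
  have hk1 : d1.keys = A.map Prod.fst := by
    rw [hd1, PySem.Dict.keys_foldl_modify_key A Prod.fst 0 (fun _ kv => (fun x => x + 1 * kv.2))]
    rw [PySem.Dict.keys_empty, PySem.Set.update_nil_left]
    simp [pysem, hA]
  have hn1 : d1.keys.Nodup := by rw [hk1]; exact hA
  have hk2 : d2.keys = A.map Prod.fst ++
      (B.map Prod.fst).filter (fun y => !(List.contains (A.map Prod.fst) y)) := by
    rw [hd2, PySem.Dict.keys_foldl_modify_key B Prod.fst 0 (fun _ kv => (fun x => x + s * kv.2))]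
    rw [PySem.Set.update_eq_append_filter, hk1]
    congr 1
    simp [pysem, hB]
  have hn2 : d2.keys.Nodup := by
    rw [hd2]
    exact PySem.Dict.nodup_keys_foldl_modify_key B Prod.fst 0 _ d1 hn1
  have hval : ∀ k, d2.getD k 0 = lkSum A k + s * lkSum B k := by
    intro k
    rw [hd2, getD_fold_modify, hd1, getD_fold_modify]
    simp [PySem.Dict.getD_empty]
  rw [PySem.Dict.items_eq_map_keys d2 hn2 0, hk2, List.map_append]
  congr 1
  · rw [List.map_map]
    apply List.map_congr_left
    intro kv hm
    simp only [Function.comp_apply]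
    rw [hval kv.1, lkSum_of_mem A kv hA hm]
  · rw [List.filter_map, List.map_map]
    simp only [Function.comp_def]
    apply List.map_congr_left
    intro kv hm
    rw [List.mem_filter] at hm
    have h1 : lkSum A kv.1 = 0 := by
      apply lkSum_of_not_mem
      simpa using hm.2
    rw [hval kv.1, h1, lkSum_of_mem B kv hB hm.1, zero_add]

theorem step_add_eq : (fun (d : PySem.Dict String Int) (kv : String × Int) => d.modify kv.1 0 (· + kv.2))
    = (fun d kv => d.modify kv.1 0 (fun x => x + 1 * kv.2)) := by
  funext d kv; congr 1; funext x; ring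

theorem step_sub_eq : (fun (d : PySem.Dict String Int) (kv : String × Int) => d.modify kv.1 0 (· - kv.2))
    = (fun d kv => d.modify kv.1 0 (fun x => x + (-1) * kv.2)) := by
  funext d kv; congr 1; funext x; ring

theorem alt_eq (a b : List (String × Int)) (op : String) :
    operation_t_alt a b op =
      (((PySem.Dict.ofList a).items).map fun kv =>
          (kv.1, kv.2 + (if op == "+" then (1:Int) else -1) * lkSum (PySem.Dict.ofList b).items kv.1)) ++
      ((((PySem.Dict.ofList b).items).filter fun kv =>
          !(List.contains (((PySem.Dict.ofList a).items).map Prod.fst) kv.1)).map fun kv =>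
          (kv.1, (if op == "+" then (1:Int) else -1) * kv.2)) := by
  unfold operation_t_alt
  dsimp only
  congr 1
  · apply List.map_congr_left
    intro kv _
    rw [getD_eq_lkSum _ (PySem.Dict.nodup_keys_ofList b) kv.1]
  · congr 1
    apply List.filter_congr
    intro kv _
    congr 1
    rw [PySem.Dict.contains_eq_decide_mem_keys]
    have : (PySem.Dict.ofList a).keys = ((PySem.Dict.ofList a).items).map Prod.fst := rfl
    rw [this]
    by_cases h : kv.1 ∈ ((PySem.Dict.ofList a).items).map Prod.fst
    · simp [h]
    · simp [h]

-- ===== VERDICT (by name: the statement is the Claim_ definition above) =====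
theorem operation_t_spec : Claim_equal_operation_t := by
  intro a b op _
  unfold Spec_operation_t operation_t
  dsimp only
  rw [alt_eq]
  have hA := PySem.Dict.nodup_keys_ofList (ν := Int) a
  have hB := PySem.Dict.nodup_keys_ofList (ν := Int) b
  by_cases h : op == "+"
  · simp only [h, if_true]
    rw [step_add_eq]
    exact core 1 (PySem.Dict.ofList a).items (PySem.Dict.ofList b).items hA hB
  · simp only [h, if_false, Bool.false_eq_true]
    rw [step_add_eq, step_sub_eq]
    exact core (-1) (PySem.Dict.ofList a).items (PySem.Dict.ofList b).items hA hB
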